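-- pv_equiv track=rewrite | github.com/manoharnv/autonomus_sre_bot | src/autonomous_sre_bot/tools/log_analyzer_tool.py | _analyze_security
-- ===== SOURCE A (Python) =====
-- from typing import Type, List, Dict
--
-- def _analyze_security(log_entries: List[Dict]) -> str:
--     """Analyze security-related issues in logs."""
--     # Look for logs that might indicate security issues
--     security_indicators = ["unauthorized", "invalid token", "access denied", "forbidden",
--                           "invalid credentials", "authentication failed", "security", "breach"]
--     security_logs = [log for log in log_entries if
--                     any(indicator in log["message"].lower() for indicator in security_indicators)]
--
--     if not security_logs:
--         return "No clear security-related issues identified in the logs."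
--
--     # Simple analysis of security logs
--     analysis = f"Found {len(security_logs)} logs potentially related to security issues.\n\n"
--
--     # Group by severity
--     severity_count = {}
--     for log in security_logs:
--         severity = log["severity"]
--         severity_count[severity] = severity_count.get(severity, 0) + 1
--
--     # Report on severity distribution
--     analysis += "### Security Issues by Severity\n"
--     for severity, count in sorted(severity_count.items(), key=lambda x: x[1], reverse=True):
--         analysis += f"- **{severity}**: {count} logs\n"
--
--     # Look for authentication failure patterns
--     auth_failures = [log for log in security_logs if
--                     any(term in log["message"].lower() for term in
--                        ["login", "authentication", "auth", "credentials"])]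
--
--     if auth_failures:
--         analysis += f"\n### Authentication Issues\n"
--         analysis += f"- Found {len(auth_failures)} authentication-related security logs\n"
--         # Sample a few recent authentication issues
--         analysis += "- Recent authentication issues:\n"
--         for log in auth_failures[:3]:
--             analysis += f"  - [{log['timestamp']}] {log['service']}: {log['message'][:100]}...\n"
--
--     return analysis
-- ===== SOURCE B (Python) =====
-- from typing import List, Dict
--
-- def _analyze_security(log_entries: List[Dict]) -> str:
--     """Analyze security-related issues in logs (single fused pass)."""
--     security_indicators = ["unauthorized", "invalid token", "access denied", "forbidden",
--                            "invalid credentials", "authentication failed", "security", "breach"]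
--     auth_terms = ["login", "authentication", "auth", "credentials"]
--
--     n_sec = 0
--     severity_count = {}
--     n_auth = 0
--     samples = []
--     for log in log_entries:
--         msg = log["message"].lower()
--         if any(indicator in msg for indicator in security_indicators):
--             n_sec += 1
--             severity = log["severity"]
--             severity_count[severity] = severity_count.get(severity, 0) + 1
--             if any(term in msg for term in auth_terms):
--                 n_auth += 1
--                 if len(samples) < 3:
--                     samples.append(f"  - [{log['timestamp']}] {log['service']}: {log['message'][:100]}...\n")
--
--     if n_sec == 0:
--         return "No clear security-related issues identified in the logs."
--
--     parts = [f"Found {n_sec} logs potentially related to security issues.\n\n",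
--              "### Security Issues by Severity\n"]
--     for severity, count in sorted(severity_count.items(), key=lambda x: x[1], reverse=True):
--         parts.append(f"- **{severity}**: {count} logs\n")
--
--     if n_auth:
--         parts.append(f"\n### Authentication Issues\n"
--                      f"- Found {n_auth} authentication-related security logs\n"
--                      f"- Recent authentication issues:\n")
--         parts.extend(samples)
--
--     return "".join(parts)
-- ===== Notes on version B (the rewrite author's own statement) =====
-- stated objective: alternative
-- what changed: B fuses A's three separate scans (security filter, severity-count loop, auth filter) into one pass that lowercases each message once and accumulates the count, the severity dict, the auth count and the first three sample lines, then assembles the report by joining a parts list.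
import Mathlib
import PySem

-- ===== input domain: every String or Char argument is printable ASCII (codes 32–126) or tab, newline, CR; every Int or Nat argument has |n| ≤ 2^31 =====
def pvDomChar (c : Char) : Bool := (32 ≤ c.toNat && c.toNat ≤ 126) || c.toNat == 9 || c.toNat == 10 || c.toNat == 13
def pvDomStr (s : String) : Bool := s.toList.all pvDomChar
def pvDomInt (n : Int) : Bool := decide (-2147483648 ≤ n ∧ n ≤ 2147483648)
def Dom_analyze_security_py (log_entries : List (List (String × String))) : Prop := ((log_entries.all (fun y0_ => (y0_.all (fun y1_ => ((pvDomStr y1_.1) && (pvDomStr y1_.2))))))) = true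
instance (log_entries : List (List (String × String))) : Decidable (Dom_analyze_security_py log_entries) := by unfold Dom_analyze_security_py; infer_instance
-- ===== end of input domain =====

-- B fuses A's three scans over the logs into one pass (message.lower() computed once per log) and
-- assembles the report from a parts list; same output, proved equal on Pre_ (where A raises no KeyError).

-- shared helpers (the Python dict operations log[k] / `x in log["message"].lower()`; used by both ports and Pre_)
def pvGetD (log : List (String × String)) (k : String) : String :=
  (PySem.Dict.mk log).getD k ""

def pvSecurityIndicators : List String :=
  ["unauthorized", "invalid token", "access denied", "forbidden",
   "invalid credentials", "authentication failed", "security", "breach"]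

def pvAuthTerms : List String := ["login", "authentication", "auth", "credentials"]

-- any(indicator in log["message"].lower() for indicator in security_indicators)
def pvIsSec (log : List (String × String)) : Bool :=
  pvSecurityIndicators.any (fun ind => PySem.Str.isIn ind (PySem.Str.lower (pvGetD log "message")))

-- any(term in log["message"].lower() for term in ["login", "authentication", "auth", "credentials"])
def pvIsAuth (log : List (String × String)) : Bool :=
  pvAuthTerms.any (fun t => PySem.Str.isIn t (PySem.Str.lower (pvGetD log "message")))

-- f"  - [{log['timestamp']}] {log['service']}: {log['message'][:100]}...\n"
def pvSampleLine (log : List (String × String)) : String :=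
  "  - [" ++ pvGetD log "timestamp" ++ "] " ++ pvGetD log "service" ++ ": "
    ++ PySem.Str.slice (pvGetD log "message") none (some 100) ++ "...\n"

-- ===== PORT A =====
def analyze_security_py (log_entries : List (List (String × String))) : String :=
  let security_logs := log_entries.filter pvIsSec
  if security_logs = [] then
    "No clear security-related issues identified in the logs."
  else
    let analysis := "Found " ++ PySem.Int.toStr (PySem.List.len security_logs)
      ++ " logs potentially related to security issues.\n\n"
    let severity_count : PySem.Dict String Int :=
      security_logs.foldl
        (fun d log => d.insert (pvGetD log "severity") (d.getD (pvGetD log "severity") 0 + 1))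
        PySem.Dict.empty
    let analysis := analysis ++ "### Security Issues by Severity\n"
    let analysis :=
      (PySem.List.sorted severity_count.items (fun x => x.2) true).foldl
        (fun acc p => acc ++ ("- **" ++ p.1 ++ "**: " ++ PySem.Int.toStr p.2 ++ " logs\n"))
        analysis
    let auth_failures := security_logs.filter pvIsAuth
    if auth_failures = [] then analysis
    else
      let analysis := analysis ++ "\n### Authentication Issues\n"
      let analysis := analysis ++ ("- Found " ++ PySem.Int.toStr (PySem.List.len auth_failures)
        ++ " authentication-related security logs\n")
      let analysis := analysis ++ "- Recent authentication issues:\n"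
      (PySem.List.slice auth_failures none (some 3)).foldl
        (fun acc log => acc ++ pvSampleLine log) analysis

-- ===== PORT B =====
-- loop state: (n_sec, severity_count, n_auth, samples)
def pvBStep (s : Int × PySem.Dict String Int × Int × List String)
    (log : List (String × String)) : Int × PySem.Dict String Int × Int × List String :=
  let msg := PySem.Str.lower (pvGetD log "message")
  if pvSecurityIndicators.any (fun ind => PySem.Str.isIn ind msg) then
    let severity := pvGetD log "severity"
    let d := s.2.1.insert severity (s.2.1.getD severity 0 + 1)
    if pvAuthTerms.any (fun t => PySem.Str.isIn t msg) then
      if s.2.2.2.length < 3 then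
        (s.1 + 1, d, s.2.2.1 + 1, s.2.2.2 ++ [pvSampleLine log])
      else
        (s.1 + 1, d, s.2.2.1 + 1, s.2.2.2)
    else
      (s.1 + 1, d, s.2.2.1, s.2.2.2)
  else s

def analyze_security_py_alt (log_entries : List (List (String × String))) : String :=
  let st := log_entries.foldl pvBStep (0, PySem.Dict.empty, 0, [])
  let n_sec := st.1
  let severity_count := st.2.1
  let n_auth := st.2.2.1
  let samples := st.2.2.2
  if n_sec = 0 then
    "No clear security-related issues identified in the logs."
  else
    let parts := ["Found " ++ PySem.Int.toStr n_sec ++ " logs potentially related to security issues.\n\n",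
                  "### Security Issues by Severity\n"]
    let parts :=
      (PySem.List.sorted severity_count.items (fun x => x.2) true).foldl
        (fun ps p => ps ++ ["- **" ++ p.1 ++ "**: " ++ PySem.Int.toStr p.2 ++ " logs\n"]) parts
    let parts :=
      if n_auth ≠ 0 then
        (parts ++ ["\n### Authentication Issues\n"
          ++ "- Found " ++ PySem.Int.toStr n_auth ++ " authentication-related security logs\n"
          ++ "- Recent authentication issues:\n"]) ++ samples
      else parts
    PySem.Str.join "" parts

-- ===== PRECONDITION & SPEC =====
-- Pre_ excludes exactly the inputs where A raises KeyError: a log without "message", a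
-- security-matching log without "severity", or one of the first three authentication-matching
-- security logs without "timestamp" or "service".
def Pre_analyze_security_py (log_entries : List (List (String × String))) : Prop :=
  (∀ log ∈ log_entries, (PySem.Dict.mk log).contains "message" = true) ∧
  (∀ log ∈ log_entries, pvIsSec log = true → (PySem.Dict.mk log).contains "severity" = true) ∧
  (∀ log ∈ ((log_entries.filter pvIsSec).filter pvIsAuth).take 3,
      (PySem.Dict.mk log).contains "timestamp" = true ∧ (PySem.Dict.mk log).contains "service" = true)
instance (log_entries : List (List (String × String))) : Decidable (Pre_analyze_security_py log_entries) := by unfold Pre_analyze_security_py; infer_instance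

def pvWitness_analyze_security_py : (List (List (String × String))) :=
  [[("message", "security breach"), ("severity", "high")]]

def Spec_analyze_security_py (log_entries : List (List (String × String))) (out : String) : Prop := out = analyze_security_py_alt log_entries
instance (log_entries : List (List (String × String))) (out : String) : Decidable (Spec_analyze_security_py log_entries out) := by unfold Spec_analyze_security_py; infer_instance

-- ===== CLAIM (what is proved, stated in full; the proofs are below) =====
def Claim_equal_analyze_security_py : Prop := ∀ (log_entries : List (List (String × String))), Dom_analyze_security_py log_entries → Pre_analyze_security_py log_entries → Spec_analyze_security_py log_entries (analyze_security_py log_entries)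

-- ===== LEMMAS AND PROOFS =====

-- pvBStep written with the named tests (definitional: the let-bound msg is the same term)
theorem pvBStep_eq (s : Int × PySem.Dict String Int × Int × List String)
    (log : List (String × String)) :
    pvBStep s log =
      if pvIsSec log then
        let severity := pvGetD log "severity"
        let d := s.2.1.insert severity (s.2.1.getD severity 0 + 1)
        if pvIsAuth log then
          if s.2.2.2.length < 3 then (s.1 + 1, d, s.2.2.1 + 1, s.2.2.2 ++ [pvSampleLine log])
          else (s.1 + 1, d, s.2.2.1 + 1, s.2.2.2)
        else (s.1 + 1, d, s.2.2.1, s.2.2.2)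
      else s := rfl

-- B's fused loop, characterised by A's three filtered scans
theorem pvBStep_foldl (xs : List (List (String × String)))
    (c : Int) (d : PySem.Dict String Int) (a : Int) (smp : List String) :
    xs.foldl pvBStep (c, d, a, smp) =
      (c + ((xs.filter pvIsSec).length : Int),
       (xs.filter pvIsSec).foldl
         (fun d log => d.insert (pvGetD log "severity") (d.getD (pvGetD log "severity") 0 + 1)) d,
       a + (((xs.filter pvIsSec).filter pvIsAuth).length : Int),
       smp ++ ((((xs.filter pvIsSec).filter pvIsAuth).map pvSampleLine).take (3 - smp.length))) := by
  induction xs generalizing c d a smp with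
  | nil => simp
  | cons x t ih =>
    rw [List.foldl_cons, pvBStep_eq]
    by_cases hs : pvIsSec x = true
    · by_cases ha : pvIsAuth x = true
      · by_cases hl : smp.length < 3
        · have h3 : 3 - smp.length = (3 - (smp.length + 1)) + 1 := by omega
          simp only [hs, ha, if_pos hl, if_true, ih, List.filter_cons, List.map_cons,
            List.length_cons, List.length_append, h3,
            List.take_succ_cons, List.foldl_cons, List.append_assoc, List.cons_append,
            List.nil_append, Prod.mk.injEq]
          exact ⟨by push_cast; ring, trivial, by push_cast; ring, by simp⟩
        · have h0 : 3 - smp.length = 0 := by omega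
          simp only [hs, ha, if_neg hl, if_true, ih, List.filter_cons, List.map_cons,
            List.length_cons, h0, List.take_zero, List.append_nil, List.foldl_cons, Prod.mk.injEq]
          exact ⟨by push_cast; ring, trivial, by push_cast; ring, trivial⟩
      · simp only [hs, ha, if_true, Bool.false_eq_true, if_false, ih, List.filter_cons,
          List.length_cons, List.foldl_cons, Prod.mk.injEq]
        exact ⟨by push_cast; ring, trivial⟩
    · simp only [hs, Bool.false_eq_true, if_false, ih, List.filter_cons]

-- a string-building loop 'acc += f(x)' on the character level
theorem pv_strfold {α : Type} (f : α → String) (l : List α) (acc : String) :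
    (l.foldl (fun a x => a ++ f x) acc).toList =
      acc.toList ++ (l.map (fun x => (f x).toList)).flatten := by
  induction l generalizing acc with
  | nil => simp
  | cons x t ih => simp [ih]

-- ''.join on the character level
theorem pv_join_toList (parts : List String) :
    (PySem.Str.join "" parts).toList = (parts.map String.toList).flatten := by
  rw [PySem.Str.toList_join]
  show [].intercalate _ = _
  generalize List.map String.toList parts = l
  induction l with
  | nil => rfl
  | cons x t ih => cases t <;> simp_all [List.intercalate, List.intersperse, List.flatten]

-- ===== VERDICT (by name: the statement is the Claim_ definition above) =====
set_option maxRecDepth 8192 in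
theorem analyze_security_py_spec : Claim_equal_analyze_security_py := by
  intro xs _ hpre
  unfold Spec_analyze_security_py analyze_security_py analyze_security_py_alt
  rw [pvBStep_foldl]
  by_cases hS : xs.filter pvIsSec = []
  · simp [hS]
  · have hlen : ((xs.filter pvIsSec).length : Int) ≠ 0 := by
      simpa using fun h => hS (List.length_eq_zero_iff.mp h)
    simp only [hS, zero_add, if_neg hlen, if_false]
    have hslice : PySem.List.slice (List.filter pvIsAuth (List.filter pvIsSec xs)) none (some 3)
        = (List.filter pvIsAuth (List.filter pvIsSec xs)).take 3 := by
      simpa using PySem.List.slice_to (List.filter pvIsAuth (List.filter pvIsSec xs))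
        (b := 3) (by norm_num)
    by_cases hA : List.filter pvIsAuth (List.filter pvIsSec xs) = []
    · apply String.toList_inj.mp
      simp only [hA, List.length_nil, Nat.cast_zero, ne_eq, not_true_eq_false, if_false,
        ite_true]
      rw [PySem.List.foldl_append_singleton_eq_map, pv_strfold, pv_join_toList]
      simp [List.map_map, Function.comp_def, PySem.List.len_eq, List.append_assoc]
    · have hA' : ((List.filter pvIsAuth (List.filter pvIsSec xs)).length : Int) ≠ 0 := by
        simpa using fun h => hA (List.length_eq_zero_iff.mp h)
      apply String.toList_inj.mp
      simp only [if_neg hA, if_pos hA', ne_eq]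
      rw [hslice, PySem.List.foldl_append_singleton_eq_map, pv_strfold, pv_join_toList]
      simp only [String.toList_append]
      rw [pv_strfold]
      simp [List.map_map, Function.comp_def, PySem.List.len_eq, List.map_take,
        List.flatten_append, List.append_assoc]
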